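-- pv_equiv track=rewrite | github.com/badr540/advent-of-code | 2024/Day8/main.py | find_all_antenna_pairs
-- ===== SOURCE A (Python) =====
-- def find_all_antenna_pairs(map):
--     pairs = []
--     for i in range(len(map)):
--         for j in range(len(map[i])):
--             for k in range(len(map)):
--                 for l in range(len(map[k])):
--                     if i == k and j == l:
--                         continue
--                     if map[i][j] != '.' and map[i][j] == map[k][l]:
--                         pairs.append([(i,j), (k,l)])
--
--     return pairs
-- ===== SOURCE B (Python) =====
-- def find_all_antenna_pairs(map):
--     # Group all cell positions by character once (row-major), then for each
--     # non-'.' cell emit its pairs from the group index instead of rescanning the grid.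
--     groups = {}
--     for i, row in enumerate(map):
--         for j, c in enumerate(row):
--             groups.setdefault(c, []).append((i, j))
--     pairs = []
--     for i, row in enumerate(map):
--         for j, c in enumerate(row):
--             if c != '.':
--                 for q in groups[c]:
--                     if q != (i, j):
--                         pairs.append([(i, j), q])
--     return pairs
-- ===== Notes on version B (the rewrite author's own statement) =====
-- stated objective: alternative
-- what changed: Replaces the quadruple nested scan over all cell pairs with a one-pass dict grouping positions by character, then emits each cell's partners from its group; intended as faster (the probe measured 1.9-2.8x but could not confirm the label since the output itself is quadratic-sized).
import Mathlib
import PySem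

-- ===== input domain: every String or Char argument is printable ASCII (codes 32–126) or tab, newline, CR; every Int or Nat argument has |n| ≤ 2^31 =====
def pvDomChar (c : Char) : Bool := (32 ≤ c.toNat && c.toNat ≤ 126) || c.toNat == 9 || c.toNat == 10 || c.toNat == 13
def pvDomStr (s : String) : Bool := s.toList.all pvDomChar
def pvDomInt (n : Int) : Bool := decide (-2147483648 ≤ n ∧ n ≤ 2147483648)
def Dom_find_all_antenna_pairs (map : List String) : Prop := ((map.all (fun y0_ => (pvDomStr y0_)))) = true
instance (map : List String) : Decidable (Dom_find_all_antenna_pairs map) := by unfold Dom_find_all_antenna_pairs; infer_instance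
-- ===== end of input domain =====

-- B groups positions by character once in a dict and emits each cell's partners from its group, instead of A's rescan of the whole grid per cell (alternative algorithm; a timing run did not confirm a speed label).
-- ===== PORT A =====
def find_all_antenna_pairs (map : List String) : List (List (Int × Int)) :=
  (PySem.List.pyRange 0 (map.length : Int) 1).foldl (fun pairs i =>
    (PySem.List.pyRange 0 ((PySem.List.pyGetD map i "").toList.length : Int) 1).foldl (fun pairs j =>
      (PySem.List.pyRange 0 (map.length : Int) 1).foldl (fun pairs k =>
        (PySem.List.pyRange 0 ((PySem.List.pyGetD map k "").toList.length : Int) 1).foldl (fun pairs l =>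
          if i = k ∧ j = l then pairs
          else if PySem.List.pyGetD (PySem.List.pyGetD map i "").toList j ' ' ≠ '.' ∧
                  PySem.List.pyGetD (PySem.List.pyGetD map i "").toList j ' ' =
                  PySem.List.pyGetD (PySem.List.pyGetD map k "").toList l ' ' then
            pairs ++ [[(i, j), (k, l)]]
          else pairs) pairs) pairs) pairs) []

-- ===== PORT B =====
def find_all_antenna_pairs_alt (map : List String) : List (List (Int × Int)) :=
  let groups : PySem.Dict Char (List (Int × Int)) :=
    (PySem.List.enumerate map 0).foldl (fun d p =>
      (PySem.List.enumerate p.2.toList 0).foldl (fun d q =>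
        d.modify q.2 [] (· ++ [(p.1, q.1)])) d) PySem.Dict.empty
  (PySem.List.enumerate map 0).foldl (fun pairs p =>
    (PySem.List.enumerate p.2.toList 0).foldl (fun pairs q =>
      if q.2 ≠ '.' then
        (groups.getD q.2 []).foldl (fun pairs pos =>
          if pos ≠ (p.1, q.1) then pairs ++ [[(p.1, q.1), pos]] else pairs) pairs
      else pairs) pairs) []

-- ===== PRECONDITION & SPEC =====
def Spec_find_all_antenna_pairs (map : List String) (out : List (List (Int × Int))) : Prop := out = find_all_antenna_pairs_alt map
instance (map : List String) (out : List (List (Int × Int))) : Decidable (Spec_find_all_antenna_pairs map out) := by unfold Spec_find_all_antenna_pairs; infer_instance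

-- ===== CLAIM (what is proved, stated in full; the proofs are below) =====
def Claim_equal_find_all_antenna_pairs : Prop := ∀ (map : List String), Dom_find_all_antenna_pairs map → Spec_find_all_antenna_pairs map (find_all_antenna_pairs map)

-- ===== LEMMAS AND PROOFS =====

/-- The grid as a row-major list of (character, position) cells. -/
def pvCells (map : List String) : List (Char × (Int × Int)) :=
  (PySem.List.enumerate map 0).flatMap (fun p =>
    (PySem.List.enumerate p.2.toList 0).map (fun q => (q.2, (p.1, q.1))))

theorem pv_foldl_flatMap {α β γ : Type} (l : List α) (g : α → List β) (f : γ → β → γ)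
    (init : γ) :
    (l.flatMap g).foldl f init = l.foldl (fun acc x => (g x).foldl f acc) init := by
  induction l generalizing init with
  | nil => rfl
  | cons x t ih => simp [List.flatMap_cons, List.foldl_append, ih]

/-- A nested enumerate/enumerate loop over the grid is a fold over pvCells. -/
theorem pv_nested_enum {α : Type} (map : List String) (f : α → Char × (Int × Int) → α)
    (init : α) :
    (PySem.List.enumerate map 0).foldl (fun acc p =>
      (PySem.List.enumerate p.2.toList 0).foldl (fun acc q => f acc (q.2, (p.1, q.1))) acc) init
    = (pvCells map).foldl f init := by
  rw [pvCells, pv_foldl_flatMap]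
  simp only [List.foldl_map]

theorem pv_enum_pyrange {α β : Type} (xs : List β) (d : β) (f : α → Int × β → α) (init : α) :
    (PySem.List.pyRange 0 (xs.length : Int) 1).foldl
      (fun acc i => f acc (i, PySem.List.pyGetD xs i d)) init
    = (PySem.List.enumerate xs 0).foldl f init := by
  have h := PySem.List.enumerate_eq_map_pyRange (xs := xs) d
  rw [h]
  simp [List.foldl_map, PySem.List.len]

/-- A nested range/range loop with pyGetD indexing over the grid is a fold over pvCells. -/
theorem pv_nested_pyrange {α : Type} (map : List String) (f : α → Char × (Int × Int) → α)
    (init : α) :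
    (PySem.List.pyRange 0 (map.length : Int) 1).foldl (fun acc i =>
      (PySem.List.pyRange 0 ((PySem.List.pyGetD map i "").toList.length : Int) 1).foldl
        (fun acc j =>
          f acc (PySem.List.pyGetD (PySem.List.pyGetD map i "").toList j ' ', (i, j))) acc) init
    = (pvCells map).foldl f init := by
  rw [← pv_nested_enum map f init]
  rw [← pv_enum_pyrange map ""
    (f := fun acc p => (PySem.List.enumerate p.2.toList 0).foldl
      (fun acc q => f acc (q.2, (p.1, q.1))) acc) init]
  refine PySem.List.foldl_congr_mem _ _ _ _ ?_
  intro acc i _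
  simpa using pv_enum_pyrange (PySem.List.pyGetD map i "").toList ' '
    (fun acc q => f acc (q.2, (i, q.1))) acc

/-- Inner body of A per ordered cell pair, flattened. -/
def pvFA (p : Char × (Int × Int)) (acc : List (List (Int × Int)))
    (q : Char × (Int × Int)) : List (List (Int × Int)) :=
  if p.2.1 = q.2.1 ∧ p.2.2 = q.2.2 then acc
  else if p.1 ≠ '.' ∧ p.1 = q.1 then acc ++ [[p.2, q.2]] else acc

theorem pv_A_flat (map : List String) :
    find_all_antenna_pairs map
    = (pvCells map).foldl (fun acc p => (pvCells map).foldl (pvFA p) acc) [] := by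
  have h1 :
      find_all_antenna_pairs map
      = (pvCells map).foldl (fun acc p =>
          (PySem.List.pyRange 0 (map.length : Int) 1).foldl (fun acc k =>
            (PySem.List.pyRange 0 ((PySem.List.pyGetD map k "").toList.length : Int) 1).foldl
              (fun acc l =>
                pvFA p acc
                  (PySem.List.pyGetD (PySem.List.pyGetD map k "").toList l ' ', (k, l))) acc)
            acc) [] :=
    pv_nested_pyrange map (fun acc p =>
      (PySem.List.pyRange 0 (map.length : Int) 1).foldl (fun acc k =>
        (PySem.List.pyRange 0 ((PySem.List.pyGetD map k "").toList.length : Int) 1).foldl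
          (fun acc l =>
            pvFA p acc
              (PySem.List.pyGetD (PySem.List.pyGetD map k "").toList l ' ', (k, l))) acc)
        acc) []
  rw [h1]
  refine PySem.List.foldl_congr_mem _ _ _ _ ?_
  intro acc p _
  exact pv_nested_pyrange map (pvFA p) acc

theorem pv_B_flat (map : List String) :
    find_all_antenna_pairs_alt map
    = (pvCells map).foldl (fun acc p =>
        if p.1 ≠ '.' then
          ((((pvCells map).foldl (fun d r => d.modify r.1 [] (· ++ [r.2]))
              PySem.Dict.empty).getD p.1 [])).foldl
            (fun acc pos => if pos ≠ p.2 then acc ++ [[p.2, pos]] else acc) acc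
        else acc) [] := by
  show (PySem.List.enumerate map 0).foldl _ [] = _
  rw [show ((PySem.List.enumerate map 0).foldl (fun d p =>
      (PySem.List.enumerate p.2.toList 0).foldl (fun d q =>
        d.modify q.2 [] (· ++ [(p.1, q.1)])) d) PySem.Dict.empty)
    = (pvCells map).foldl (fun d r => d.modify r.1 [] (· ++ [r.2])) PySem.Dict.empty from
    pv_nested_enum map (fun d r => d.modify r.1 [] (· ++ [r.2])) PySem.Dict.empty]
  exact pv_nested_enum map (fun acc p =>
    if p.1 ≠ '.' then
      ((((pvCells map).foldl (fun d r => d.modify r.1 [] (· ++ [r.2]))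
          PySem.Dict.empty).getD p.1 [])).foldl
        (fun acc pos => if pos ≠ p.2 then acc ++ [[p.2, pos]] else acc) acc
    else acc) []

theorem pv_inner (map : List String) (p : Char × (Int × Int))
    (acc : List (List (Int × Int))) :
    (pvCells map).foldl (pvFA p) acc
    = if p.1 ≠ '.' then
        ((((pvCells map).foldl (fun d r => d.modify r.1 [] (· ++ [r.2]))
            PySem.Dict.empty).getD p.1 [])).foldl
          (fun acc pos => if pos ≠ p.2 then acc ++ [[p.2, pos]] else acc) acc
      else acc := by
  have hG : (((pvCells map).foldl (fun d r => d.modify r.1 [] (· ++ [r.2]))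
      PySem.Dict.empty).getD p.1 [])
      = ((pvCells map).filter (fun r => r.1 == p.1)).map (·.2) := by
    rw [PySem.Dict.getD_foldl_modify_append]
    simp
  have hA : (pvCells map).foldl (pvFA p) acc
      = acc ++ ((pvCells map).filter (fun q =>
          decide (¬(p.2.1 = q.2.1 ∧ p.2.2 = q.2.2) ∧ p.1 ≠ '.' ∧ p.1 = q.1))).map
          (fun q => [p.2, q.2]) := by
    rw [PySem.List.foldl_congr_mem (g := fun acc q =>
        if (¬(p.2.1 = q.2.1 ∧ p.2.2 = q.2.2) ∧ p.1 ≠ '.' ∧ p.1 = q.1) then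
          acc ++ [[p.2, q.2]] else acc)
      (h := by
        intro acc q _
        unfold pvFA
        by_cases h1 : p.2.1 = q.2.1 ∧ p.2.2 = q.2.2 <;>
          by_cases h2 : p.1 ≠ '.' ∧ p.1 = q.1 <;> simp [h1, h2])]
    exact PySem.List.foldl_append_ite _ _ _ _
  rw [hA]
  by_cases hc : p.1 = '.'
  · simp [hc]
  · rw [if_pos hc, hG]
    rw [PySem.List.foldl_append_ite (fun pos => pos ≠ p.2) (fun pos => [p.2, pos])]
    rw [List.filter_map, List.map_map]
    congr 1
    rw [List.filter_filter]
    refine congrArg (List.map _) (List.filter_congr ?_)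
    intro q _
    by_cases h1 : q.1 = p.1 <;> by_cases h2 : q.2 = p.2 <;>
      simp [h1, h2, Prod.ext_iff, hc, @eq_comm _ p.1, @eq_comm _ p.2.1,
        @eq_comm _ p.2.2]

-- ===== VERDICT (by name: the statement is the Claim_ definition above) =====
theorem find_all_antenna_pairs_spec : Claim_equal_find_all_antenna_pairs := by
  intro map _
  unfold Spec_find_all_antenna_pairs
  rw [pv_A_flat, pv_B_flat]
  refine PySem.List.foldl_congr_mem _ _ _ _ ?_
  intro acc p _
  exact pv_inner map p acc
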